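-- pv_equiv track=rewrite | github.com/jso122-2/DAWN_pub_real | semantic/parmenides_token_linker.py | _check_lineage_preservation
-- ===== SOURCE A (Python) =====
-- from typing import Dict, List, Set, Tuple, Optional
--
-- def _check_lineage_preservation(occurrences: List[Dict]) -> bool:
--     """
--     Check if token occurrences preserve lineage relationships.
--
--     Args:
--         occurrences: List of token occurrences
--
--     Returns:
--         True if lineage is preserved across occurrences
--     """
--     # Collect all lineages
--     all_lineages = []
--     for occ in occurrences:
--         lineage = occ.get('rebloom_lineage', [])
--         if lineage:
--             all_lineages.append(set(lineage))
--
--     if len(all_lineages) < 2: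
--         return False
--
--     # Check for overlapping lineages
--     for i in range(len(all_lineages)):
--         for j in range(i + 1, len(all_lineages)):
--             if all_lineages[i] & all_lineages[j]:
--                 return True
--
--     return False
-- ===== SOURCE B (Python) =====
-- def _check_lineage_preservation(occurrences):
--     """Single pass: grow a global set of seen lineage members; any member
--     seen in an earlier non-empty lineage means two lineages overlap."""
--     seen = set()
--     for occ in occurrences:
--         lineage = occ.get('rebloom_lineage', [])
--         if lineage:
--             s = set(lineage)
--             if not seen.isdisjoint(s):
--                 return True
--             seen |= s
--     return False
-- ===== Notes on version B (the rewrite author's own statement) =====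
-- stated objective: alternative
-- what changed: Replaces the collect-then-all-pairs set-intersection scan with a single pass that accumulates one global seen-set and reports overlap on the first lineage sharing an element with it.
import Mathlib
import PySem

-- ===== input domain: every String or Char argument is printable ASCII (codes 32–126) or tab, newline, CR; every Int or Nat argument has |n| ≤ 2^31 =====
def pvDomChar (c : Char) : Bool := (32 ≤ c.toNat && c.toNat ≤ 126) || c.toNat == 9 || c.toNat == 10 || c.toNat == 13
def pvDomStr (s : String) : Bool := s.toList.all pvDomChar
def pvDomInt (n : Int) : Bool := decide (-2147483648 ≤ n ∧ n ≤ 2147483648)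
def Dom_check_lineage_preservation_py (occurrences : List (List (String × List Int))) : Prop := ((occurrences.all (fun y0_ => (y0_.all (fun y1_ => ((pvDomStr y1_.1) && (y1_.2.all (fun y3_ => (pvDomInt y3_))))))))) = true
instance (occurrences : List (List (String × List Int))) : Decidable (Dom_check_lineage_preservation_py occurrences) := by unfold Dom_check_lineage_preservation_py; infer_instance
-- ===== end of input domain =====

-- B replaces A's collect-then-all-pairs intersection scan with one pass over the
-- occurrences that grows a global seen-set and stops at the first shared element.

-- ===== PORT A =====
def check_lineage_preservation_py (occurrences : List (List (String × List Int))) : Bool :=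
  let all_lineages : List (PySem.Set Int) :=
    occurrences.foldl (fun acc occ =>
      let lineage := PySem.Dict.getD ⟨occ⟩ "rebloom_lineage" []
      if !lineage.isEmpty then acc ++ [PySem.Set.ofList lineage] else acc) []
  if all_lineages.length < 2 then false
  else
    (PySem.List.pyRange 0 (all_lineages.length : Int) 1).any (fun i =>
      (PySem.List.pyRange (i + 1) (all_lineages.length : Int) 1).any (fun j =>
        !(PySem.Set.inter (PySem.List.pyGetD all_lineages i PySem.Set.empty)
                          (PySem.List.pyGetD all_lineages j PySem.Set.empty)).isEmpty))

-- ===== PORT B =====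
def clpLoop : List (List (String × List Int)) → PySem.Set Int → Bool
  | [], _ => false
  | occ :: rest, seen =>
    let lineage := PySem.Dict.getD ⟨occ⟩ "rebloom_lineage" []
    if lineage.isEmpty then clpLoop rest seen
    else
      let s := PySem.Set.ofList lineage
      if !(PySem.Set.isdisjoint seen s) then true
      else clpLoop rest (PySem.Set.union seen s)

def check_lineage_preservation_py_alt (occurrences : List (List (String × List Int))) : Bool :=
  clpLoop occurrences PySem.Set.empty

-- ===== PRECONDITION & SPEC =====
def Spec_check_lineage_preservation_py (occurrences : List (List (String × List Int))) (out : Bool) : Prop := out = check_lineage_preservation_py_alt occurrences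
instance (occurrences : List (List (String × List Int))) (out : Bool) : Decidable (Spec_check_lineage_preservation_py occurrences out) := by unfold Spec_check_lineage_preservation_py; infer_instance

-- ===== CLAIM (what is proved, stated in full; the proofs are below) =====
def Claim_equal_check_lineage_preservation_py : Prop := ∀ (occurrences : List (List (String × List Int))), Dom_check_lineage_preservation_py occurrences → Spec_check_lineage_preservation_py occurrences (check_lineage_preservation_py occurrences)

-- ===== LEMMAS AND PROOFS =====

-- the non-empty lineage sets, in order (what A's first loop collects)
def pLin (occ : List (String × List Int)) : Bool :=
  !(PySem.Dict.getD ⟨occ⟩ "rebloom_lineage" ([] : List Int)).isEmpty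
def fLin (occ : List (String × List Int)) : PySem.Set Int :=
  PySem.Set.ofList (PySem.Dict.getD ⟨occ⟩ "rebloom_lineage" [])
def lineSets (occs : List (List (String × List Int))) : List (PySem.Set Int) :=
  (occs.filter pLin).map fLin

-- structural "some two sets in the list overlap"
def PairP : List (PySem.Set Int) → Prop
  | [] => False
  | s :: rest => (∃ t ∈ rest, ∃ x, x ∈ s ∧ x ∈ t) ∨ PairP rest

-- indexed form of the same statement (what A's double loop checks)
def PairIdx (L : List (PySem.Set Int)) : Prop :=
  ∃ i j, ∃ (hi : i < L.length) (hj : j < L.length), i < j ∧ ∃ x, x ∈ L[i] ∧ x ∈ L[j]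

theorem pairIdx_iff_pairP (L : List (PySem.Set Int)) : PairIdx L ↔ PairP L := by
  induction L with
  | nil => simp [PairIdx, PairP]
  | cons s rest ih =>
    constructor
    · rintro ⟨i, j, hi, hj, hij, x, hx1, hx2⟩
      simp only [List.length_cons] at hi hj
      cases i with
      | zero =>
        left
        obtain ⟨j', rfl⟩ : ∃ j', j = j' + 1 := ⟨j - 1, by omega⟩
        exact ⟨rest[j']'(by omega), List.getElem_mem _, x, by simpa using hx1,
          by simpa using hx2⟩
      | succ i' =>
        right
        obtain ⟨j', rfl⟩ : ∃ j', j = j' + 1 := ⟨j - 1, by omega⟩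
        exact ih.mp ⟨i', j', by omega, by omega, by omega, x,
          by simpa using hx1, by simpa using hx2⟩
    · rintro (⟨t, ht, x, hx1, hx2⟩ | h)
      · obtain ⟨j', hj', rfl⟩ := List.mem_iff_getElem.mp ht
        exact ⟨0, j' + 1, by simp, by simp only [List.length_cons]; omega, by omega, x,
          by simpa using hx1, by simpa using hx2⟩
      · obtain ⟨i, j, hi, hj, hij, x, hx1, hx2⟩ := (ih.mpr h)
        exact ⟨i + 1, j + 1, by simp only [List.length_cons]; omega,
          by simp only [List.length_cons]; omega, by omega, x,
          by simpa using hx1, by simpa using hx2⟩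

theorem lineSets_cons_pos (occ : List (String × List Int)) (rest : List (List (String × List Int)))
    (h : pLin occ = true) : lineSets (occ :: rest) = fLin occ :: lineSets rest := by
  simp [lineSets, h]

theorem lineSets_cons_neg (occ : List (String × List Int)) (rest : List (List (String × List Int)))
    (h : pLin occ = false) : lineSets (occ :: rest) = lineSets rest := by
  simp [lineSets, h]

theorem clpLoop_iff (occs : List (List (String × List Int))) (seen : PySem.Set Int) :
    clpLoop occs seen = true ↔
      (∃ s ∈ lineSets occs, ∃ x, x ∈ seen ∧ x ∈ s) ∨ PairP (lineSets occs) := by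
  induction occs generalizing seen with
  | nil => simp [clpLoop, lineSets, PairP]
  | cons occ rest ih =>
    by_cases h : pLin occ = true
    · have hne : (PySem.Dict.getD ⟨occ⟩ "rebloom_lineage" ([] : List Int)).isEmpty = false := by
        simpa [pLin] using h
      rw [lineSets_cons_pos occ rest h]
      by_cases hd : PySem.Set.isdisjoint seen (PySem.Set.ofList
          (PySem.Dict.getD ⟨occ⟩ "rebloom_lineage" [])) = true
      · have hnov : ¬ ∃ x, x ∈ seen ∧ x ∈ fLin occ := by
          rintro ⟨x, hx1, hx2⟩
          exact (PySem.Set.isdisjoint_iff _ _).mp hd x hx1 (by simpa [fLin] using hx2)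
        simp only [clpLoop, hne, hd, Bool.not_true, Bool.false_eq_true, if_false]
        rw [ih]
        constructor
        · rintro (⟨s, hs, x, hx1, hx2⟩ | hp)
          · rcases (PySem.Set.mem_union _ _ _).mp hx1 with hx | hx
            · exact Or.inl ⟨s, List.mem_cons_of_mem _ hs, x, hx, hx2⟩
            · exact Or.inr (Or.inl ⟨s, hs, x, by simpa [fLin] using hx, hx2⟩)
          · exact Or.inr (Or.inr hp)
        · rintro (⟨s, hs, x, hx1, hx2⟩ | ⟨t, ht, x, hx1, hx2⟩ | hp)
          · rcases List.mem_cons.mp hs with rfl | hs'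
            · exact absurd ⟨x, hx1, hx2⟩ hnov
            · exact Or.inl ⟨s, hs', x, (PySem.Set.mem_union _ _ _).mpr (Or.inl hx1), hx2⟩
          · exact Or.inl ⟨t, ht, x,
              (PySem.Set.mem_union _ _ _).mpr (Or.inr (by simpa [fLin] using hx1)), hx2⟩
          · exact Or.inr hp
      · have hov : ∃ x, x ∈ seen ∧ x ∈ fLin occ := by
          by_contra hno
          push Not at hno
          exact hd ((PySem.Set.isdisjoint_iff _ _).mpr
            (fun x hx hx2 => hno x hx (by simpa [fLin] using hx2)))
        simp only [Bool.not_eq_true] at hd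
        simp only [clpLoop, hne, hd, Bool.not_false, Bool.false_eq_true, if_false, if_true]
        simp only [true_iff]
        exact Or.inl ⟨fLin occ, List.mem_cons_self, hov⟩
    · rw [lineSets_cons_neg occ rest (by simpa using h)]
      have hemp : (PySem.Dict.getD ⟨occ⟩ "rebloom_lineage" ([] : List Int)).isEmpty = true := by
        simpa [pLin] using h
      simp only [clpLoop, hemp, if_true]
      exact ih seen

theorem aPort_iff (occs : List (List (String × List Int))) :
    check_lineage_preservation_py occs = true ↔ PairIdx (lineSets occs) := by
  simp only [check_lineage_preservation_py]
  rw [PySem.List.foldl_append_if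
      (p := fun occ : List (String × List Int) =>
        !(PySem.Dict.getD ⟨occ⟩ "rebloom_lineage" ([] : List Int)).isEmpty)
      (f := fun occ : List (String × List Int) =>
        PySem.Set.ofList (PySem.Dict.getD ⟨occ⟩ "rebloom_lineage" []))]
  simp only [List.nil_append]
  have hL : (occs.filter (fun occ : List (String × List Int) =>
        !(PySem.Dict.getD ⟨occ⟩ "rebloom_lineage" ([] : List Int)).isEmpty)).map
      (fun occ : List (String × List Int) =>
        PySem.Set.ofList (PySem.Dict.getD ⟨occ⟩ "rebloom_lineage" [])) = lineSets occs := rfl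
  rw [hL]
  set L := lineSets occs with hLdef
  by_cases hlen : L.length < 2
  · simp only [if_pos hlen]
    constructor
    · intro h; exact absurd h (by simp)
    · rintro ⟨i, j, hi, hj, hij, _⟩; omega
  · simp only [if_neg hlen]
    rw [List.any_eq_true]
    constructor
    · rintro ⟨i, hiR, hinner⟩
      rw [List.any_eq_true] at hinner
      obtain ⟨j, hjR, hov⟩ := hinner
      rw [PySem.List.mem_pyRange_one] at hiR hjR
      have hi0 : 0 ≤ i := hiR.1
      have hj0 : 0 ≤ j := by omega
      have hiN : i.toNat < L.length := by omega
      have hjN : j.toNat < L.length := by omega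
      have hgi : PySem.List.pyGetD L i PySem.Set.empty = L[i.toNat] := by
        conv_lhs => rw [show i = (i.toNat : Int) by omega]
        rw [PySem.List.pyGetD_natCast, List.getD_eq_getElem _ _ hiN]
      have hgj : PySem.List.pyGetD L j PySem.Set.empty = L[j.toNat] := by
        conv_lhs => rw [show j = (j.toNat : Int) by omega]
        rw [PySem.List.pyGetD_natCast, List.getD_eq_getElem _ _ hjN]
      rw [hgi, hgj] at hov
      have hex : ∃ x, x ∈ PySem.Set.inter L[i.toNat] L[j.toNat] := by
        rcases List.ne_nil_iff_exists_cons.mp (List.isEmpty_eq_false_iff.mp (by simpa using hov))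
          with ⟨y, ys, hy⟩
        exact ⟨y, by simp [hy]⟩
      obtain ⟨x, hx⟩ := hex
      have hx' := (PySem.Set.mem_inter _ _ _).mp hx
      exact ⟨i.toNat, j.toNat, hiN, hjN, by omega, x, hx'.1, hx'.2⟩
    · rintro ⟨i, j, hi, hj, hij, x, hx1, hx2⟩
      refine ⟨(i : Int), ?_, ?_⟩
      · rw [PySem.List.mem_pyRange_one]; omega
      · rw [List.any_eq_true]
        refine ⟨(j : Int), by rw [PySem.List.mem_pyRange_one]; omega, ?_⟩
        have hgi : PySem.List.pyGetD L (i : Int) PySem.Set.empty = L[i] := by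
          rw [PySem.List.pyGetD_natCast, List.getD_eq_getElem _ _ hi]
        have hgj : PySem.List.pyGetD L (j : Int) PySem.Set.empty = L[j] := by
          rw [PySem.List.pyGetD_natCast, List.getD_eq_getElem _ _ hj]
        rw [hgi, hgj]
        have hx : x ∈ PySem.Set.inter L[i] L[j] := (PySem.Set.mem_inter _ _ _).mpr ⟨hx1, hx2⟩
        simp [List.ne_nil_of_mem hx]

-- ===== VERDICT (by name: the statement is the Claim_ definition above) =====
theorem check_lineage_preservation_py_spec : Claim_equal_check_lineage_preservation_py := by
  intro occs _
  unfold Spec_check_lineage_preservation_py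
  rw [Bool.eq_iff_iff, aPort_iff]
  unfold check_lineage_preservation_py_alt
  rw [clpLoop_iff, pairIdx_iff_pairP]
  simp [PySem.Set.empty]
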